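-- pv_equiv track=rewrite | github.com/MikeBendorf11/Python-Algorithms | python1.py | GroupColors
-- ===== SOURCE A (Python) =====
-- def GroupColors(arr):
--   result = []
--   for i in range(len(arr)):
--     if arr[i] == 1:
--       result.append(arr[i])
--     else:
--       result.insert(0, arr[i])
--   return result
-- ===== SOURCE B (Python) =====
-- def GroupColors(arr):
--   # Two-cursor scatter: count non-ones, preallocate, write reversed front / forward tail.
--   m = sum(1 for x in arr if x != 1)
--   res = [None] * len(arr)
--   lo = m - 1
--   hi = m
--   for x in arr:
--     if x != 1:
--       res[lo] = x
--       lo -= 1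
--     else:
--       res[hi] = x
--       hi += 1
--   return res
-- ===== Notes on version B (the rewrite author's own statement) =====
-- stated objective: faster
-- what changed: Instead of growing a list with insert(0)/append, B counts the non-ones first, preallocates the output and scatters each element once via two write cursors (downward for non-ones, upward for ones).
import Mathlib
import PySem

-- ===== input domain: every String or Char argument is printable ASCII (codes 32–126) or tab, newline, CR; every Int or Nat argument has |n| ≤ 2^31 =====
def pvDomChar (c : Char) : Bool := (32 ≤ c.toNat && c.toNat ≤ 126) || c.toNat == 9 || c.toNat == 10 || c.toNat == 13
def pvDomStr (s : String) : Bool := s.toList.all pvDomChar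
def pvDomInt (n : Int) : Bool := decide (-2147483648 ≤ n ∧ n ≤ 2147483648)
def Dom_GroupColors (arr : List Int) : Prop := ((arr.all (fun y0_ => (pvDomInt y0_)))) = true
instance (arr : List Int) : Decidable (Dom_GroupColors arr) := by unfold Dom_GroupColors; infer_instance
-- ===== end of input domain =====

-- B replaces A's insert(0)/append growing list by a count + preallocate + two-cursor scatter (asymptotically faster: no O(n) front insertions).


-- ===== PORT A =====
-- `for i in range(len(arr))` reads arr[i] for each valid i, i.e. the elements of arr in order;
-- ported as a fold over the elements carrying the growing `result` list.
def GroupColors (arr : List Int) : List Int :=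
  arr.foldl (fun result x => if x = 1 then result ++ [x] else x :: result) []

-- ===== PORT B =====
-- m = sum(1 for x in arr if x != 1); res = [None]*len(arr); two cursors lo/hi (Python ints),
-- res[c] = x ported as List.set (cursors are in range whenever a write happens).
def GroupColors_alt (arr : List Int) : List Int :=
  let m : Nat := arr.countP (fun x => decide (x ≠ 1))
  let st := arr.foldl
    (fun (s : List (Option Int) × Int × Int) x =>
      if x ≠ 1 then (s.1.set s.2.1.toNat (some x), s.2.1 - 1, s.2.2)
      else (s.1.set s.2.2.toNat (some x), s.2.1, s.2.2 + 1))
    (List.replicate arr.length (none : Option Int), ((m : Int) - 1, (m : Int)))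
  st.1.map (fun o => o.getD 0)

-- ===== PRECONDITION & SPEC =====
def Spec_GroupColors (arr : List Int) (out : List Int) : Prop := out = GroupColors_alt arr
instance (arr : List Int) (out : List Int) : Decidable (Spec_GroupColors arr out) := by unfold Spec_GroupColors; infer_instance

-- ===== CLAIM (what is proved, stated in full; the proofs are below) =====
def Claim_equal_GroupColors : Prop := ∀ (arr : List Int), Dom_GroupColors arr → Spec_GroupColors arr (GroupColors arr)

-- ===== LEMMAS AND PROOFS =====

-- A's loop: ones are appended, non-ones pushed to the front.
lemma foldA_char (s : List Int) (res : List Int) :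
    s.foldl (fun result x => if x = 1 then result ++ [x] else x :: result) res
      = (s.filter (fun x => decide (x ≠ 1))).reverse ++ res ++ s.filter (fun x => decide (x = 1)) := by
  induction s generalizing res with
  | nil => simp
  | cons x s ih =>
    by_cases h : x = 1 <;> simp [h, ih]

lemma set_repl_front {α : Type} (t : Nat) (a v : α) (l : List α) :
    (List.replicate (t + 1) a ++ l).set t v = List.replicate t a ++ v :: l := by
  induction t with
  | zero => simp
  | succ t ih => simpa [List.replicate_succ] using ih

lemma set_at_length {α : Type} (l : List α) (y v : α) (ys : List α) :
    (l ++ y :: ys).set l.length v = l ++ v :: ys := by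
  induction l with
  | nil => simp
  | cons z l ih => simp [ih]

lemma len_filter_split (s : List Int) :
    (s.filter (fun x => decide (x ≠ 1))).length + (s.filter (fun x => decide (x = 1))).length
      = s.length := by
  induction s with
  | nil => simp
  | cons x s ih =>
    simp only [List.filter_cons, ne_eq, decide_not] at ih ⊢
    by_cases h : x = 1 <;> simp [h] <;> omega

-- B's loop invariant: the output buffer is a block of t blanks, then the already-written
-- reversed front (front) and forward tail (back), then b blanks; the cursors sit at the
-- two inner boundaries.
lemma foldB_char (s : List Int) : ∀ (t b : Nat) (front back : List Int),
    t = (s.filter (fun x => decide (x ≠ 1))).length →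
    b = (s.filter (fun x => decide (x = 1))).length →
    s.foldl
      (fun (st : List (Option Int) × Int × Int) x =>
        if x ≠ 1 then (st.1.set st.2.1.toNat (some x), st.2.1 - 1, st.2.2)
        else (st.1.set st.2.2.toNat (some x), st.2.1, st.2.2 + 1))
      (List.replicate t (none : Option Int) ++ front.map some ++ back.map some
         ++ List.replicate b (none : Option Int),
       ((t : Int) - 1, (t : Int) + front.length + back.length))
    = (((s.filter (fun x => decide (x ≠ 1))).reverse ++ front).map some
         ++ (back ++ s.filter (fun x => decide (x = 1))).map some,
       (-1, ((s.filter (fun x => decide (x ≠ 1))).reverse ++ front).length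
              + ((back ++ s.filter (fun x => decide (x = 1))).length : Int))) := by
  induction s with
  | nil =>
    intro t b front back ht hb
    simp at ht hb
    subst ht; subst hb
    simp
  | cons x s ih =>
    intro t b front back ht hb
    by_cases h : x = 1
    · -- one: written at hi = t + front.length + back.length, hi += 1
      subst h
      have hb' : b = (s.filter (fun x => decide (x = 1))).length + 1 := by
        simpa [List.filter_cons] using hb
      have ht' : t = (s.filter (fun x => decide (x ≠ 1))).length := by
        simpa [List.filter_cons] using ht
      have hhiNat : ((t : Int) + front.length + back.length).toNat
          = (List.replicate t (none : Option Int) ++ front.map some ++ back.map some).length := by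
        simp; omega
      have hset : (List.replicate t (none : Option Int) ++ front.map some ++ back.map some
            ++ List.replicate b (none : Option Int)).set
            ((t : Int) + front.length + back.length).toNat (some 1)
          = List.replicate t (none : Option Int) ++ front.map some ++ (back ++ [1]).map some
            ++ List.replicate ((s.filter (fun x => decide (x = 1))).length) (none : Option Int) := by
        rw [hhiNat, hb', List.replicate_succ]
        rw [show List.replicate t (none : Option Int) ++ front.map some ++ back.map some
              ++ ((none : Option Int) :: List.replicate ((s.filter (fun x => decide (x = 1))).length) none)
            = (List.replicate t (none : Option Int) ++ front.map some ++ back.map some)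
              ++ (none : Option Int) :: List.replicate ((s.filter (fun x => decide (x = 1))).length) none by
          simp [List.append_assoc]]
        rw [set_at_length]
        simp [List.append_assoc]
      have := ih t ((s.filter (fun x => decide (x = 1))).length) front (back ++ [1]) ht' rfl
      simp only [List.foldl_cons, if_neg (by simp : ¬ ((1:Int) ≠ 1))]
      rw [hset]
      have harith : (t : Int) + front.length + back.length + 1
          = (t : Int) + front.length + (back ++ [1]).length := by simp; ring
      rw [harith]
      rw [this]
      simp [List.append_assoc]
    · -- non-one: written at lo = t - 1, lo -= 1
      have ht' : t = (s.filter (fun x => decide (x ≠ 1))).length + 1 := by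
        simpa [List.filter_cons, h] using ht
      have hb' : b = (s.filter (fun x => decide (x = 1))).length := by
        simpa [List.filter_cons, h] using hb
      set t' := (s.filter (fun x => decide (x ≠ 1))).length with ht'def
      have hloNat : ((t : Int) - 1).toNat = t' := by omega
      have hset : (List.replicate t (none : Option Int) ++ front.map some ++ back.map some
            ++ List.replicate b (none : Option Int)).set ((t : Int) - 1).toNat (some x)
          = List.replicate t' (none : Option Int) ++ (x :: front).map some ++ back.map some
            ++ List.replicate b (none : Option Int) := by
        rw [hloNat, ht']
        rw [show List.replicate (t' + 1) (none : Option Int) ++ front.map some ++ back.map some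
              ++ List.replicate b (none : Option Int)
            = List.replicate (t' + 1) (none : Option Int)
              ++ (front.map some ++ back.map some ++ List.replicate b (none : Option Int)) by
          simp [List.append_assoc]]
        rw [set_repl_front]
        simp [List.append_assoc]
      have := ih t' b (x :: front) back rfl hb'
      simp only [List.foldl_cons, if_pos (by exact h : x ≠ 1)]
      rw [hset]
      have harith1 : (t : Int) - 1 - 1 = (t' : Int) - 1 := by omega
      have harith2 : (t : Int) + front.length + back.length
          = (t' : Int) + (x :: front).length + back.length := by
        simp; omega
      rw [harith1, harith2, this]
      simp [h, List.append_assoc]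

theorem GroupColors_spec : Claim_equal_GroupColors := by
  intro arr _
  unfold Spec_GroupColors GroupColors GroupColors_alt
  have hcount : arr.countP (fun x => decide (x ≠ 1))
      = (arr.filter (fun x => decide (x ≠ 1))).length := List.countP_eq_length_filter
  have hlen : arr.length = (arr.filter (fun x => decide (x ≠ 1))).length
      + (arr.filter (fun x => decide (x = 1))).length := (len_filter_split arr).symm
  have hrepl : List.replicate arr.length (none : Option Int)
      = List.replicate ((arr.filter (fun x => decide (x ≠ 1))).length) (none : Option Int)
        ++ ([] : List Int).map some ++ ([] : List Int).map some
        ++ List.replicate ((arr.filter (fun x => decide (x = 1))).length) (none : Option Int) := by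
    rw [hlen, List.replicate_add]; simp
  simp only [hcount, hrepl]
  have hB := foldB_char arr ((arr.filter (fun x => decide (x ≠ 1))).length)
      ((arr.filter (fun x => decide (x = 1))).length) [] [] rfl rfl
  have hA := foldA_char arr []
  simp only [List.length_nil] at hB
  rw [show ((((arr.filter (fun x => decide (x ≠ 1))).length : Int) - 1,
        ((arr.filter (fun x => decide (x ≠ 1))).length : Int)))
      = ((((arr.filter (fun x => decide (x ≠ 1))).length : Int) - 1),
        (((arr.filter (fun x => decide (x ≠ 1))).length : Int) + (0:Nat) + (0:Nat))) by simp]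
  rw [hB, hA]
  simp [List.map_map]
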